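-- pv_equiv track=rewrite | github.com/geioi/adventofcode2024 | day11.py | part2
-- ===== SOURCE A (Python) =====
-- def part2(lines):
--     for line in lines:
--         jupid = line.strip().split(' ')
--         nrsInList = {}
--         for nr in jupid:
--             if nr in nrsInList:
--                 nrsInList[nr] += 1
--             else:
--                 nrsInList[nr] = 1
--         updated_arr = []
--         for i in range(75):
--             for key, value in nrsInList.copy().items():
--                 if value != 0:
--                     if key == '0':
--                         if '1' in nrsInList:
--                             nrsInList['1'] += (1 * value)
--                         else:
--                             nrsInList['1'] = (1 * value)
--                         nrsInList[key] -= (1 * value)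
--                     elif len(key) % 2 == 0:
--                         leftNr = key[0:len(key) // 2].lstrip('0')
--                         rightNr = key[len(key) // 2:].lstrip('0')
--                         if leftNr == '':
--                             leftNr = '0'
--                         if rightNr == '':
--                             rightNr = '0'
--                         if leftNr in nrsInList:
--                             nrsInList[leftNr] += (1 * value)
--                         else:
--                             nrsInList[leftNr] = (1 * value)
--                         if rightNr in nrsInList:
--                             nrsInList[rightNr] += (1 * value)
--                         else:
--                             nrsInList[rightNr] = (1 * value)
--                         nrsInList[key] -= (1 * value)
--                     else:
--                         calculated = str(int(key) * 2024)
--                         if calculated in nrsInList: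
--                             nrsInList[calculated] += (1 * value)
--                         else:
--                             nrsInList[calculated] = (1 * value)
--                         nrsInList[key] -= (1 * value)
--         totalLen = 0
--         for value in nrsInList.values():
--             totalLen += value
--
--     return totalLen
-- ===== SOURCE B (Python) =====
-- def part2(lines):
--     # Top-down memoized recursion: count(stone, steps) = how many stones `stone`
--     # becomes after `steps` blinks; stones kept as strings (A's rule is on strings).
--     memo = {}
--
--     def count(stone, steps):
--         if steps == 0:
--             return 1
--         key = (stone, steps)
--         if key in memo:
--             return memo[key]
--         if stone == '0':
--             r = count('1', steps - 1)
--         elif len(stone) % 2 == 0: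
--             half = len(stone) // 2
--             left = stone[:half].lstrip('0') or '0'
--             right = stone[half:].lstrip('0') or '0'
--             r = count(left, steps - 1) + count(right, steps - 1)
--         else:
--             r = count(str(int(stone) * 2024), steps - 1)
--         memo[key] = r
--         return r
--
--     for line in lines:
--         total = sum(count(tok, 75) for tok in line.strip().split(' '))
--     return total
-- ===== Notes on version B (the rewrite author's own statement) =====
-- stated objective: alternative
-- what changed: A simulates all 75 blinks forward with a stone->multiplicity counter dict rebuilt in place each round; B computes the answer by a top-down memoized recursion count(stone, steps) over the same string-level blink rule, summing count(tok, 75) per token.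
-- outside the precondition, e.g. on part2(['+15']): A returns 30362920197073, B returns 30362920197073
import Mathlib
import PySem

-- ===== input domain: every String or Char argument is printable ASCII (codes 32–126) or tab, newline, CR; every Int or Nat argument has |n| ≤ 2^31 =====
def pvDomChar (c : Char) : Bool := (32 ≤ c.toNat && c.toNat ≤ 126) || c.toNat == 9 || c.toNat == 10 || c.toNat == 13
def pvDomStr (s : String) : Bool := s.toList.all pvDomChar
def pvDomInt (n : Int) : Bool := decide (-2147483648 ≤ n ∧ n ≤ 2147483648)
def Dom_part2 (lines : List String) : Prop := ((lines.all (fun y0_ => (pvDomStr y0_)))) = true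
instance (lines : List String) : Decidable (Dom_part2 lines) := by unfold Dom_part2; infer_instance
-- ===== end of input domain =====

-- B replaces A's 75-round counter-dict simulation by a top-down memoized recursion
-- count(stone, steps) over the same string-level blink rule (objective: alternative).
-- Both programs raise NameError on `lines == []` and ValueError on tokens whose blink
-- descendants are not int()-parseable; Pre_part2 excludes those inputs.
-- Python dicts are ported as Std.HashMap (the counter grows to thousands of keys over
-- the 75 rounds, so an association list cannot be evaluated); the snapshot iteration
-- order of `.copy().items()` differs from CPython's insertion order, but the proved
-- equivalence shows the returned total is independent of that order.

-- ===== PORT A =====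
-- shared blink-rule helpers (the identical expressions occur in both Pythons)
-- `line.strip().split(' ')`
def pvTokens (line : String) : List (List Char) :=
  PySem.Chars.splitOn (PySem.Chars.strip line.toList) [' ']
-- `s or '0'` / the `if leftNr == '': leftNr = '0'` fix-up
def pvCanon (s : List Char) : List Char := if s = [] then ['0'] else s
-- `key[0:len(key)//2].lstrip('0')` (slice with 0 ≤ h ≤ len = take; lstrip('0') drops leading '0's — exact)
def pvLeft (k : List Char) : List Char := pvCanon ((k.take (k.length / 2)).dropWhile (· == '0'))
-- `key[len(key)//2:].lstrip('0')`
def pvRight (k : List Char) : List Char := pvCanon ((k.drop (k.length / 2)).dropWhile (· == '0'))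
-- `str(int(key) * 2024)`; `int(key)` raises where ofChars? = none — those inputs are outside Pre_part2
def pvMul (k : List Char) : List Char :=
  PySem.Int.toChars (((PySem.Int.ofChars? k).getD 0) * 2024)

-- `if k in d: d[k] += a  else: d[k] = a`
def pvBump (d : Std.HashMap (List Char) Int) (k : List Char) (a : Int) :
    Std.HashMap (List Char) Int :=
  if d.contains k then d.insert k (d.getD k 0 + a) else d.insert k a

-- body of A's `for key, value in nrsInList.copy().items():`
def pvStepItem (d : Std.HashMap (List Char) Int) (kv : List Char × Int) :
    Std.HashMap (List Char) Int :=
  if kv.2 ≠ 0 then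
    if kv.1 = ['0'] then
      let d1 := pvBump d ['1'] kv.2
      d1.insert kv.1 (d1.getD kv.1 0 - kv.2)
    else if kv.1.length % 2 == 0 then
      let d1 := pvBump d (pvLeft kv.1) kv.2
      let d2 := pvBump d1 (pvRight kv.1) kv.2
      d2.insert kv.1 (d2.getD kv.1 0 - kv.2)
    else
      let d1 := pvBump d (pvMul kv.1) kv.2
      d1.insert kv.1 (d1.getD kv.1 0 - kv.2)
  else d

-- one blink: iterate over a snapshot (`.copy().items()`) of the dict
def pvStep (d : Std.HashMap (List Char) Int) : Std.HashMap (List Char) Int :=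
  d.toList.foldl pvStepItem d

-- A's body for one line: build the counter, blink 75 times, sum the values
def pvLineA (line : String) : Int :=
  let d0 := (pvTokens line).foldl (fun d nr => pvBump d nr 1) ∅
  let d := (List.range 75).foldl (fun d _ => pvStep d) d0
  d.toList.foldl (fun acc p => acc + p.2) 0

-- `for line in lines: …` then `return totalLen` (last line wins; the init 0 is the
-- unreachable empty-`lines` case, where Python raises NameError — excluded by Pre_part2)
def part2 (lines : List String) : Int :=
  lines.foldl (fun _ line => pvLineA line) 0

-- ===== PORT B =====
-- `def count(stone, steps)` — memoized on the (stone, steps) pair; recursion on steps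
def pvCount : Nat → List Char → Std.HashMap (List Char × Nat) Int →
    Int × Std.HashMap (List Char × Nat) Int
  | 0, _, memo => (1, memo)
  | steps + 1, stone, memo =>
    match memo[(stone, steps + 1)]? with
    | some v => (v, memo)
    | none =>
      let p :=
        if stone = ['0'] then pvCount steps ['1'] memo
        else if stone.length % 2 == 0 then
          let pa := pvCount steps (pvLeft stone) memo
          let pb := pvCount steps (pvRight stone) pa.2
          (pa.1 + pb.1, pb.2)
        else pvCount steps (pvMul stone) memo
      (p.1, p.2.insert (stone, steps + 1) p.1)

-- `total = sum(count(tok, 75) for tok in line.strip().split(' '))`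
def pvLineB (line : String) (memo : Std.HashMap (List Char × Nat) Int) :
    Int × Std.HashMap (List Char × Nat) Int :=
  (pvTokens line).foldl
    (fun p tok => let q := pvCount 75 tok p.2; (p.1 + q.1, q.2)) (0, memo)

def part2_alt (lines : List String) : Int :=
  (lines.foldl (fun p line => pvLineB line p.2) (0, ∅)).1

-- ===== PRECONDITION & SPEC =====
-- Pre_ excludes the empty `lines` (NameError in both programs) and lines with a token
-- containing a non-digit character: on almost all of those A raises ValueError during
-- some blink, and on the rare survivors (int()-leniency, e.g. '+15') both programs
-- still return the same value — they are excluded only because reachability of the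
-- ValueError is not a closed-form condition.
def Pre_part2 (lines : List String) : Prop :=
  lines ≠ [] ∧ ∀ line ∈ lines, ∀ tok ∈ pvTokens line, tok.all PySem.Chars.isdigit
instance (lines : List String) : Decidable (Pre_part2 lines) := by
  unfold Pre_part2; infer_instance
def pvWitness_part2 : List String := ["125 17"]
def Spec_part2 (lines : List String) (out : Int) : Prop := out = part2_alt lines
instance (lines : List String) (out : Int) : Decidable (Spec_part2 lines out) := by
  unfold Spec_part2; infer_instance

-- ===== CLAIM (what is proved, stated in full; the proofs are below) =====
def Claim_equal_part2 : Prop :=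
  ∀ (lines : List String), Dom_part2 lines → Pre_part2 lines → Spec_part2 lines (part2 lines)

-- ===== LEMMAS AND PROOFS =====

-- the pure blink-count: how many stones `s` becomes after `n` blinks
def pvC : Nat → List Char → Int
  | 0, _ => 1
  | n + 1, s =>
    if s = ['0'] then pvC n ['1']
    else if s.length % 2 == 0 then pvC n (pvLeft s) + pvC n (pvRight s)
    else pvC n (pvMul s)

-- weighted stone count of an items list, n blinks from now
def pvG (n : Nat) (l : List (List Char × Int)) : Int :=
  (l.map (fun p => p.2 * pvC n p.1)).sum

lemma pvG_perm (n : Nat) {l l' : List (List Char × Int)} (h : l.Perm l') :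
    pvG n l = pvG n l' := by
  unfold pvG
  exact (h.map _).sum_eq

lemma pvDK (m : Std.HashMap (List Char) Int) : (m.toList.map Prod.fst).Nodup := by
  rw [List.nodup_iff_pairwise_ne, List.pairwise_map]
  have := Std.HashMap.distinct_keys_toList (m := m)
  exact this.imp (fun h => by simpa using h)

lemma pvG_filter_out (n : Nat) (k : List Char) :
    ∀ l : List (List Char × Int), (l.map Prod.fst).Nodup → ∀ v0 : Int, (k, v0) ∈ l →
      pvG n l = v0 * pvC n k + pvG n (l.filter (fun p => decide (p.1 ≠ k))) := by
  intro l
  induction l with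
  | nil => intro _ v0 h; simp at h
  | cons p l ih =>
    intro hnd v0 hmem
    simp only [List.map_cons, List.nodup_cons] at hnd
    rcases List.mem_cons.mp hmem with h | h
    · subst h
      have hl : l.filter (fun p => decide (p.1 ≠ k)) = l := by
        apply List.filter_eq_self.mpr
        intro q hq
        simp only [decide_eq_true_eq]
        intro hq'
        exact hnd.1 (List.mem_map.mpr ⟨q, hq, hq'⟩)
      rw [List.filter_cons_of_neg (by simp)]
      rw [hl]
      simp only [pvG, List.map_cons, List.sum_cons]
    · have hpk : p.1 ≠ k := by
        intro hq'
        exact hnd.1 (List.mem_map.mpr ⟨(k, v0), h, hq'.symm⟩)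
      rw [List.filter_cons_of_pos (by simpa using hpk)]
      have := ih hnd.2 v0 h
      simp only [pvG, List.map_cons, List.sum_cons] at this ⊢
      rw [this]; ring

lemma pvFilter_pred (k : List Char) (l : List (List Char × Int)) :
    l.filter (fun x => decide ¬((k == x.1) = true)) = l.filter (fun p => decide (p.1 ≠ k)) := by
  apply List.filter_congr
  intro x _
  rcases eq_or_ne x.1 k with h | h
  · simp [h]
  · simp [h, Ne.symm h]

lemma pvG_insert (d : Std.HashMap (List Char) Int)
    (k : List Char) (a : Int) (n : Nat) :
    pvG n ((d.insert k (d.getD k 0 + a)).toList) = pvG n d.toList + a * pvC n k := by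
  rw [pvG_perm n Std.HashMap.toList_insert_perm]
  by_cases hc : k ∈ d
  · have hs : d[k]?.isSome := by
      rw [← Std.HashMap.contains_eq_isSome_getElem?]; exact hc
    obtain ⟨v0, hv0⟩ := Option.isSome_iff_exists.mp hs
    have hget : d.getD k 0 = v0 := by
      rw [Std.HashMap.getD_eq_getD_getElem?, hv0]; rfl
    have hmem : (k, v0) ∈ d.toList :=
      Std.HashMap.mem_toList_iff_getElem?_eq_some.mpr hv0
    rw [pvFilter_pred, pvG_filter_out n k d.toList (pvDK d) v0 hmem]
    simp only [pvG, List.map_cons, List.sum_cons, hget]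
    ring
  · have hget : d.getD k 0 = 0 := Std.HashMap.getD_eq_fallback hc
    have hl : d.toList.filter (fun p => decide (p.1 ≠ k)) = d.toList := by
      apply List.filter_eq_self.mpr
      intro q hq
      simp only [decide_eq_true_eq]
      intro hq'
      subst hq'
      have : d[q.1]? = some q.2 := Std.HashMap.mem_toList_iff_getElem?_eq_some.mp (by
        simpa using hq)
      exact hc (by rw [← Std.HashMap.contains_iff_mem, Std.HashMap.contains_eq_isSome_getElem?, this]; rfl)
    rw [pvFilter_pred, hl]
    simp only [pvG, List.map_cons, List.sum_cons, hget]
    ring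

lemma pvBump_eq (d : Std.HashMap (List Char) Int) (k : List Char) (a : Int) :
    pvBump d k a = d.insert k (d.getD k 0 + a) := by
  unfold pvBump
  by_cases hc : d.contains k = true
  · rw [if_pos hc]
  · rw [if_neg hc,
        Std.HashMap.getD_eq_fallback_of_contains_eq_false (by simpa using hc), zero_add]

lemma pvG_bump (d : Std.HashMap (List Char) Int)
    (k : List Char) (a : Int) (n : Nat) :
    pvG n ((pvBump d k a).toList) = pvG n d.toList + a * pvC n k := by
  rw [pvBump_eq]; exact pvG_insert d k a n

lemma pvG_stepItem (d : Std.HashMap (List Char) Int)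
    (k : List Char) (v : Int) (n : Nat) :
    pvG n ((pvStepItem d (k, v)).toList) =
      pvG n d.toList + v * pvC (n + 1) k - v * pvC n k := by
  by_cases hv : v = 0
  · subst hv; simp [pvStepItem]
  · unfold pvStepItem
    simp only [ne_eq, hv, not_false_eq_true, if_true]
    by_cases h0 : k = ['0']
    · subst h0
      rw [if_pos rfl]
      rw [show ∀ x : Int, x - v = x + (-v) from fun x => by ring]
      rw [pvG_insert _ _ _ _, pvG_bump d _ _ _]
      simp [pvC]
      ring
    · rw [if_neg h0]
      by_cases he : (k.length % 2 == 0) = true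
      · rw [if_pos he]
        rw [show ∀ x : Int, x - v = x + (-v) from fun x => by ring]
        rw [pvG_insert _ _ _ _, pvG_bump _ _ _ _, pvG_bump d _ _ _]
        rw [show pvC (n + 1) k = pvC n (pvLeft k) + pvC n (pvRight k) by
          simp [pvC, h0, he]]
        ring
      · rw [if_neg he]
        rw [show ∀ x : Int, x - v = x + (-v) from fun x => by ring]
        rw [pvG_insert _ _ _ _, pvG_bump d _ _ _]
        rw [show pvC (n + 1) k = pvC n (pvMul k) by simp [pvC, h0, he]]
        ring

lemma pvG_foldl_items (n : Nat) :
    ∀ (l : List (List Char × Int)) (d : Std.HashMap (List Char) Int),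
      pvG n ((l.foldl pvStepItem d).toList) =
        pvG n d.toList + pvG (n + 1) l - pvG n l := by
  intro l
  induction l with
  | nil => intro d; simp [pvG]
  | cons p l ih =>
    intro d
    simp only [List.foldl_cons]
    rw [ih _]
    rw [show pvStepItem d p = pvStepItem d (p.1, p.2) from rfl,
        pvG_stepItem d p.1 p.2 n]
    simp only [pvG, List.map_cons, List.sum_cons]
    ring

lemma pvG_step (d : Std.HashMap (List Char) Int) (n : Nat) :
    pvG n ((pvStep d).toList) = pvG (n + 1) d.toList := by
  unfold pvStep
  rw [pvG_foldl_items n d.toList d]; ring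

lemma pvG_iter (m : Nat) :
    ∀ (n : Nat) (d : Std.HashMap (List Char) Int),
      pvG n (((List.range m).foldl (fun d _ => pvStep d) d).toList) = pvG (n + m) d.toList := by
  induction m with
  | zero => intro n d; simp
  | succ m ih =>
    intro n d
    rw [List.range_succ, List.foldl_append, List.foldl_cons, List.foldl_nil]
    rw [pvG_step _ n, ih (n + 1) d]
    congr 1
    omega

lemma pvG_counter (n : Nat) :
    ∀ (toks : List (List Char)) (d : Std.HashMap (List Char) Int),
      pvG n ((toks.foldl (fun d nr => pvBump d nr 1) d).toList) =
        pvG n d.toList + (toks.map (pvC n)).sum := by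
  intro toks
  induction toks with
  | nil => intro d; simp
  | cons t toks ih =>
    intro d
    simp only [List.foldl_cons, List.map_cons, List.sum_cons]
    rw [ih _, pvG_bump d t 1 n]
    ring

-- A's per-line value is the pure sum of 75-blink counts of the tokens
lemma pvLineA_eq (line : String) :
    pvLineA line = ((pvTokens line).map (pvC 75)).sum := by
  unfold pvLineA
  have hsum : ∀ d : Std.HashMap (List Char) Int,
      d.toList.foldl (fun acc p => acc + p.2) 0 = pvG 0 d.toList := by
    intro d
    generalize d.toList = l
    simp only [pvG, pvC, mul_one]
    rw [List.sum_eq_foldl, List.foldl_map]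
  rw [hsum]
  rw [pvG_iter 75 0 _]
  rw [pvG_counter 75 (pvTokens line) ∅]
  simp [pvG, Std.HashMap.toList_empty]

-- B's memo is correct: every entry records the pure blink-count
def pvGood (m : Std.HashMap (List Char × Nat) Int) : Prop :=
  ∀ s k v, m[(s, k)]? = some v → v = pvC k s

lemma pvGood_empty : pvGood ∅ := by
  intro s k v h; simp at h

lemma pvGood_insert (m : Std.HashMap (List Char × Nat) Int) (hm : pvGood m)
    (s : List Char) (k : Nat) (v : Int) (hv : v = pvC k s) :
    pvGood (m.insert (s, k) v) := by
  intro s' k' v' h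
  rw [Std.HashMap.getElem?_insert] at h
  split at h
  · rename_i he
    have h1 : s = s' ∧ k = k' := by simpa using he
    cases h1.1; cases h1.2
    cases h; exact hv
  · exact hm s' k' v' h

lemma pvCount_spec (k : Nat) :
    ∀ (s : List Char) (m : Std.HashMap (List Char × Nat) Int), pvGood m →
      (pvCount k s m).1 = pvC k s ∧ pvGood (pvCount k s m).2 := by
  induction k with
  | zero => intro s m hm; exact ⟨rfl, hm⟩
  | succ k ih =>
    intro s m hm
    rw [pvCount]
    cases hg : m[(s, k + 1)]? with
    | some v => exact ⟨hm s (k + 1) v hg, hm⟩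
    | none =>
      by_cases h0 : s = ['0']
      · subst h0
        rw [if_pos rfl]
        obtain ⟨h1, h2⟩ := ih ['1'] m hm
        have hv : (pvCount k ['1'] m).1 = pvC (k + 1) ['0'] := by
          rw [h1]; simp [pvC]
        exact ⟨hv, pvGood_insert _ h2 _ _ _ hv⟩
      · rw [if_neg h0]
        by_cases he : (s.length % 2 == 0) = true
        · rw [if_pos he]
          obtain ⟨ha1, ha2⟩ := ih (pvLeft s) m hm
          obtain ⟨hb1, hb2⟩ := ih (pvRight s) (pvCount k (pvLeft s) m).2 ha2
          have hv : (pvCount k (pvLeft s) m).1 + (pvCount k (pvRight s) (pvCount k (pvLeft s) m).2).1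
              = pvC (k + 1) s := by
            rw [ha1, hb1]; simp [pvC, h0, he]
          exact ⟨hv, pvGood_insert _ hb2 _ _ _ hv⟩
        · rw [if_neg he]
          obtain ⟨h1, h2⟩ := ih (pvMul s) m hm
          have hv : (pvCount k (pvMul s) m).1 = pvC (k + 1) s := by
            rw [h1]; simp [pvC, h0, he]
          exact ⟨hv, pvGood_insert _ h2 _ _ _ hv⟩

lemma pvLineB_eq (line : String) (m : Std.HashMap (List Char × Nat) Int) (hm : pvGood m) :
    (pvLineB line m).1 = ((pvTokens line).map (pvC 75)).sum ∧ pvGood (pvLineB line m).2 := by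
  have aux : ∀ (toks : List (List Char)) (x : Int) (m : Std.HashMap (List Char × Nat) Int),
      pvGood m →
      (toks.foldl (fun p tok => let q := pvCount 75 tok p.2; (p.1 + q.1, q.2)) (x, m)).1
          = x + (toks.map (pvC 75)).sum ∧
        pvGood (toks.foldl (fun p tok => let q := pvCount 75 tok p.2; (p.1 + q.1, q.2)) (x, m)).2 := by
    intro toks
    induction toks with
    | nil => intro x m hm; exact ⟨by simp, hm⟩
    | cons t toks ih =>
      intro x m hm
      simp only [List.foldl_cons, List.map_cons, List.sum_cons]
      obtain ⟨h1, h2⟩ := pvCount_spec 75 t m hm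
      obtain ⟨ih1, ih2⟩ := ih (x + (pvCount 75 t m).1) (pvCount 75 t m).2 h2
      refine ⟨?_, ih2⟩
      rw [ih1, h1]; ring
  have := aux (pvTokens line) 0 m hm
  unfold pvLineB
  exact ⟨by rw [this.1]; ring, this.2⟩

lemma pv_fold_lines :
    ∀ (lines : List String) (x : Int) (m : Std.HashMap (List Char × Nat) Int), pvGood m →
      (lines.foldl (fun p line => pvLineB line p.2) (x, m)).1 =
        lines.foldl (fun _ line => pvLineA line) x := by
  intro lines
  induction lines with
  | nil => intro x m _; rfl
  | cons l ls ih =>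
    intro x m hm
    simp only [List.foldl_cons]
    obtain ⟨h1, h2⟩ := pvLineB_eq l m hm
    have : pvLineB l m = ((pvLineB l m).1, (pvLineB l m).2) := rfl
    rw [this, h1, ← pvLineA_eq l]
    exact ih (pvLineA l) _ h2

-- ===== VERDICT (by name: the statement is the Claim_ definition above) =====
theorem part2_spec : Claim_equal_part2 := by
  intro lines _ _
  unfold Spec_part2 part2 part2_alt
  exact (pv_fold_lines lines 0 ∅ pvGood_empty).symm
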